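-- pv_equiv track=rewrite | github.com/wubo0067/ai-app-hub | vmcore-analysis-agent/src/react/output_parser.py | render_action_arguments
-- ===== SOURCE A (Python) =====
-- def render_action_arguments(arguments: list[str]) -> str:
--     """将结构化 action 参数渲染为可执行的 crash 命令字符串。
--
--     LLM 输出的 arguments 是 JSON 字符串数组，不携带 shell 引号语义。
--     对于 grep 模式中包含 alternation 的场景，需要在拼回命令时恢复引号，
--     否则 `a|b|c` 会和真正的管道符混淆。
--
--     Args:
--         arguments: LLM 生成的命令参数列表
--
--     Returns:
--         str: 渲染后的可执行 crash 命令字符串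
--
--     使用场景：
--         当 LLM 决定调用 crash 工具时，需要将参数列表转换为实际可执行的命令行字符串
--
--     注意事项：
--         特别处理 grep 命令中的管道符，避免与 shell 管道符混淆
--     """
--     rendered_tokens: list[str] = []
--     in_grep_command = False
--     grep_expects_pattern = False
--
--     for token in arguments:
--         if token == "|":
--             rendered_tokens.append(token)
--             in_grep_command = False
--             grep_expects_pattern = False
--             continue
--
--         if token == "grep":
--             rendered_tokens.append(token)
--             in_grep_command = True
--             grep_expects_pattern = True
--             continue
--
--         if in_grep_command and grep_expects_pattern and token.startswith("-"):
--             rendered_tokens.append(token)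
--             grep_expects_pattern = True
--             continue
--
--         if in_grep_command and grep_expects_pattern and _is_quoted_shell_token(token):
--             rendered_tokens.append(token)
--             grep_expects_pattern = False
--             continue
--
--         if in_grep_command and grep_expects_pattern and "|" in token:
--             rendered_tokens.append(f'"{token}"')
--             grep_expects_pattern = False
--             continue
--
--         rendered_tokens.append(token)
--         if in_grep_command and grep_expects_pattern:
--             grep_expects_pattern = False
--
--     return " ".join(rendered_tokens)
--
-- def _is_quoted_shell_token(token: str) -> bool:
--     """检查 token 是否已经被 shell 引号包围。
--
--     Args:
--         token: 待检查的字符串 token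
--
--     Returns:
--         bool: 如果 token 被双引号或单引号包围则返回 True
--     """
--     return len(token) >= 2 and token[0] == token[-1] and token[0] in {'"', "'"}
-- ===== SOURCE B (Python) =====
-- def render_action_arguments(arguments: list[str]) -> str:
--     """Two-phase: first scan records indices of grep patterns to quote, second pass renders."""
--     quote_at: set[int] = set()
--     expect = False
--     for i, token in enumerate(arguments):
--         if token == "|":
--             expect = False
--         elif token == "grep":
--             expect = True
--         elif expect:
--             if not token.startswith("-"):
--                 if "|" in token and not (
--                     len(token) >= 2 and token[0] == token[-1] and token[0] in ('"', "'")
--                 ):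
--                     quote_at.add(i)
--                 expect = False
--     return " ".join(
--         f'"{t}"' if i in quote_at else t for i, t in enumerate(arguments)
--     )
-- ===== Notes on version B (the rewrite author's own statement) =====
-- stated objective: alternative
-- what changed: A interleaves state tracking with output building in one state machine over (in_grep, expects_pattern); B separates the phases: a first scan with a single collapsed 'expect' flag records into a set the indices of grep patterns that need quoting, and a second pass renders every token by index-membership and joins.
import Mathlib
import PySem

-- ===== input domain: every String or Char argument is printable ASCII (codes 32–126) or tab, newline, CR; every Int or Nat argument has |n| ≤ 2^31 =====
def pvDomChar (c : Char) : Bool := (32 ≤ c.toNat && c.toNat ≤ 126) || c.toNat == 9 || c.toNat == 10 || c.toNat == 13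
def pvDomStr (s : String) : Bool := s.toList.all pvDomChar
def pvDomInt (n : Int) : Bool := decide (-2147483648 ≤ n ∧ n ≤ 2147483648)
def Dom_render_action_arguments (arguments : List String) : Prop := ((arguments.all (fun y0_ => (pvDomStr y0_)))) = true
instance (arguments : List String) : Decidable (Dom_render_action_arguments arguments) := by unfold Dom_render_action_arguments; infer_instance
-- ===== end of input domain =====

-- B re-decomposes A's single interleaved state machine into an index-collecting scan
-- followed by a membership-driven rendering pass; same cost, different structure.
-- ===== PORT A =====
-- _is_quoted_shell_token (total: the Option-valued pyGet? makes token[0]/token[-1] total;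
-- Python's short-circuit 'len(token) >= 2 and …' guarantees both are some there)
def is_quoted_shell_token (token : String) : Bool :=
  decide (2 ≤ PySem.Str.len token)
    && (PySem.Str.pyGet? token 0 == PySem.Str.pyGet? token (-1))
    && (PySem.Str.pyGet? token 0 == some '"' || PySem.Str.pyGet? token 0 == some '\'')

def render_action_arguments (arguments : List String) : String :=
  let res := arguments.foldl
    (fun (st : List String × Bool × Bool) token =>
      let rendered := st.1
      let in_grep := st.2.1
      let expects := st.2.2
      if token == "|" then (rendered ++ [token], false, false)
      else if token == "grep" then (rendered ++ [token], true, true)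
      else if in_grep && expects && PySem.Str.startswith token "-" then
        (rendered ++ [token], in_grep, true)
      else if in_grep && expects && is_quoted_shell_token token then
        (rendered ++ [token], in_grep, false)
      else if in_grep && expects && PySem.Str.isIn "|" token then
        (rendered ++ ["\"" ++ token ++ "\""], in_grep, false)
      else
        (rendered ++ [token], in_grep, if in_grep && expects then false else expects))
    ([], false, false)
  PySem.Str.join " " res.1

-- ===== PORT B =====
-- Source B's inline 'len(token) >= 2 and token[0] == token[-1] and token[0] in ('"', "'")'
def bIsQuoted (token : String) : Bool :=
  decide (2 ≤ PySem.Str.len token)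
    && (PySem.Str.pyGet? token 0 == PySem.Str.pyGet? token (-1))
    && (PySem.Str.pyGet? token 0 == some '"' || PySem.Str.pyGet? token 0 == some '\'')

def render_action_arguments_alt (arguments : List String) : String :=
  let st := (PySem.List.enumerate arguments 0).foldl
    (fun (st : Bool × PySem.Set Int) p =>
      if p.2 == "|" then (false, st.2)
      else if p.2 == "grep" then (true, st.2)
      else if st.1 then
        if !(PySem.Str.startswith p.2 "-") then
          (false,
            if PySem.Str.isIn "|" p.2 && !(bIsQuoted p.2) then PySem.Set.add st.2 p.1 else st.2)
        else st
      else st)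
    (false, PySem.Set.empty)
  PySem.Str.join " "
    ((PySem.List.enumerate arguments 0).map
      (fun p => if PySem.Set.contains st.2 p.1 then "\"" ++ p.2 ++ "\"" else p.2))

-- ===== PRECONDITION & SPEC =====
def Spec_render_action_arguments (arguments : List String) (out : String) : Prop := out = render_action_arguments_alt arguments
instance (arguments : List String) (out : String) : Decidable (Spec_render_action_arguments arguments out) := by unfold Spec_render_action_arguments; infer_instance

-- ===== CLAIM (what is proved, stated in full; the proofs are below) =====
def Claim_equal_render_action_arguments : Prop := ∀ (arguments : List String), Dom_render_action_arguments arguments → Spec_render_action_arguments arguments (render_action_arguments arguments)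

-- ===== LEMMAS AND PROOFS =====

-- Common characterisation of the rendered token list, parametrised by the collapsed
-- state b = (in_grep && expects_pattern).
def Rspec : List String → Bool → List String
  | [], _ => []
  | t :: ts, b =>
    if t == "|" then t :: Rspec ts false
    else if t == "grep" then t :: Rspec ts true
    else if b then
      if PySem.Str.startswith t "-" then t :: Rspec ts true
      else if is_quoted_shell_token t then t :: Rspec ts false
      else if PySem.Str.isIn "|" t then ("\"" ++ t ++ "\"") :: Rspec ts false
      else t :: Rspec ts false
    else t :: Rspec ts false

def stepA (st : List String × Bool × Bool) (token : String) : List String × Bool × Bool :=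
  if token == "|" then (st.1 ++ [token], false, false)
  else if token == "grep" then (st.1 ++ [token], true, true)
  else if st.2.1 && st.2.2 && PySem.Str.startswith token "-" then
    (st.1 ++ [token], st.2.1, true)
  else if st.2.1 && st.2.2 && is_quoted_shell_token token then
    (st.1 ++ [token], st.2.1, false)
  else if st.2.1 && st.2.2 && PySem.Str.isIn "|" token then
    (st.1 ++ ["\"" ++ token ++ "\""], st.2.1, false)
  else
    (st.1 ++ [token], st.2.1, if st.2.1 && st.2.2 then false else st.2.2)

theorem foldA_eq_Rspec (ts : List String) :
    ∀ (acc : List String) (g e : Bool),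
      (List.foldl stepA (acc, g, e) ts).1 = acc ++ Rspec ts (g && e) := by
  induction ts with
  | nil => intro acc g e; simp [Rspec]
  | cons t ts ih =>
    intro acc g e
    simp only [List.foldl_cons]
    by_cases h1 : t == "|"
    · simp [stepA, Rspec, h1, ih]
    · by_cases h2 : t == "grep"
      · simp [stepA, Rspec, h1, h2, ih]
      · cases g <;> cases e
        · simp [stepA, Rspec, h1, h2, ih]
        · simp [stepA, Rspec, h1, h2, ih]
        · simp [stepA, Rspec, h1, h2, ih]
        · by_cases h3 : PySem.Chars.startswith t.toList ['-'] <;>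
            by_cases h4 : is_quoted_shell_token t <;>
            by_cases h5 : PySem.Chars.isIn ['|'] t.toList <;>
            simp [stepA, Rspec, h1, h2, h3, h4, h5, ih]

def stepB (st : Bool × PySem.Set Int) (p : Int × String) : Bool × PySem.Set Int :=
  if p.2 == "|" then (false, st.2)
  else if p.2 == "grep" then (true, st.2)
  else if st.1 then
    if !(PySem.Str.startswith p.2 "-") then
      (false,
        if PySem.Str.isIn "|" p.2 && !(bIsQuoted p.2) then PySem.Set.add st.2 p.1 else st.2)
    else st
  else st

theorem stepB_mono (st : Bool × PySem.Set Int) (p : Int × String) (x : Int)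
    (hx : x ∈ st.2) : x ∈ (stepB st p).2 := by
  unfold stepB
  split_ifs <;> simp_all [PySem.Set.mem_add]

theorem foldB_mono (ps : List (Int × String)) :
    ∀ (st : Bool × PySem.Set Int) (x : Int), x ∈ st.2 → x ∈ (List.foldl stepB st ps).2 := by
  induction ps with
  | nil => intro st x hx; simpa using hx
  | cons p ps ih =>
    intro st x hx
    exact ih _ _ (stepB_mono st p x hx)

theorem stepB_bound (st : Bool × PySem.Set Int) (p : Int × String) (x : Int)
    (hx : x ∈ (stepB st p).2) : x ∈ st.2 ∨ x = p.1 := by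
  unfold stepB at hx
  split_ifs at hx <;> simp_all [PySem.Set.mem_add] <;> tauto

theorem foldB_bound (ts : List String) :
    ∀ (i : Int) (st : Bool × PySem.Set Int) (x : Int),
      x ∈ (List.foldl stepB st (PySem.List.enumerate ts i)).2 → x ∈ st.2 ∨ i ≤ x := by
  induction ts with
  | nil => intro i st x hx; simp [PySem.List.enumerate_nil] at hx; exact Or.inl hx
  | cons t ts ih =>
    intro i st x hx
    rw [PySem.List.enumerate_cons, List.foldl_cons] at hx
    rcases ih (i + 1) _ _ hx with h | h
    · rcases stepB_bound st (i, t) x h with h' | h'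
      · exact Or.inl h'
      · exact Or.inr (by omega)
    · exact Or.inr (by omega)

-- The next Bool state of B's first-pass step.
def nextB (b : Bool) (t : String) : Bool :=
  if t == "|" then false
  else if t == "grep" then true
  else if b then (if !(PySem.Str.startswith t "-") then false else b)
  else b

theorem stepB_fst (st : Bool × PySem.Set Int) (p : Int × String) :
    (stepB st p).1 = nextB st.1 p.2 := by
  unfold stepB nextB
  split_ifs <;> rfl

-- Main: the second pass, rendered against the FINAL set, equals Rspec.
theorem mapB_eq_Rspec (ts : List String) :
    ∀ (i : Int) (b : Bool) (q : PySem.Set Int), (∀ x ∈ q, x < i) →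
      ((PySem.List.enumerate ts i).map
        (fun p =>
          if PySem.Set.contains (List.foldl stepB (b, q) (PySem.List.enumerate ts i)).2 p.1
          then "\"" ++ p.2 ++ "\"" else p.2)) = Rspec ts b := by
  induction ts with
  | nil => intro i b q _; simp [PySem.List.enumerate_nil, Rspec]
  | cons t ts ih =>
    intro i b q hq
    rw [PySem.List.enumerate_cons, List.foldl_cons, List.map_cons]
    set st1 := stepB (b, q) (i, t) with hst1
    have hfst : st1.1 = nextB b t := stepB_fst (b, q) (i, t)
    have hq1 : ∀ x ∈ st1.2, x < i + 1 := by
      intro x hx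
      rcases stepB_bound (b, q) (i, t) x hx with h | h
      · have := hq x h; omega
      · simp at h; omega
    -- membership of i in the final set = membership of i in st1.2
    have hi : (PySem.Set.contains (List.foldl stepB st1 (PySem.List.enumerate ts (i+1))).2 i)
        = PySem.Set.contains st1.2 i := by
      rw [Bool.eq_iff_iff, PySem.Set.contains_iff, PySem.Set.contains_iff]
      constructor
      · intro hmem
        rcases foldB_bound ts (i+1) st1 i hmem with h' | h'
        · exact h'
        · omega
      · intro h; exact foldB_mono _ _ _ h
    have htail := ih (i + 1) (nextB b t) st1.2 hq1
    rw [← hfst] at htail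
    have htail' :
        ((PySem.List.enumerate ts (i+1)).map
          (fun p =>
            if PySem.Set.contains (List.foldl stepB st1 (PySem.List.enumerate ts (i+1))).2 p.1
            then "\"" ++ p.2 ++ "\"" else p.2)) = Rspec ts st1.1 := by
      simpa using htail
    -- head rendering
    unfold Rspec
    by_cases h1 : t == "|"
    · have hmem : i ∉ st1.2 := by
        intro hx
        rcases stepB_bound (b, q) (i, t) i hx with h | h
        · exact absurd (hq i h) (by omega)
        · -- i = i fine, but stepB on "|" adds nothing
          simp only [hst1, stepB, h1, if_true] at hx
          exact absurd (hq i hx) (by omega)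
      have hfst' : st1.1 = false := by simp [hfst, nextB, h1]
      rw [hi, if_neg (by simpa [PySem.Set.contains_iff] using hmem), htail', hfst']
      simp [h1]
    · by_cases h2 : t == "grep"
      · have hmem : i ∉ st1.2 := by
          intro hx
          simp only [hst1, stepB, h1, h2, if_true, if_false] at hx
          exact absurd (hq i hx) (by omega)
        have hfst' : st1.1 = true := by simp [hfst, nextB, h1, h2]
        rw [hi, if_neg (by simpa [PySem.Set.contains_iff] using hmem), htail', hfst']
        simp [h1, h2]
      · cases b with
        | false =>
          have hset : st1.2 = q := by simp [hst1, stepB, h1, h2]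
          have hmem : i ∉ st1.2 := by rw [hset]; intro hx; exact absurd (hq i hx) (by omega)
          have hfst' : st1.1 = false := by simp [hfst, nextB, h1, h2]
          rw [hi, if_neg (by simpa [PySem.Set.contains_iff] using hmem), htail', hfst']
          simp [h1, h2]
        | true =>
          by_cases h3 : PySem.Chars.startswith t.toList ['-']
          · have hset : st1.2 = q := by simp [hst1, stepB, h1, h2, h3]
            have hmem : i ∉ st1.2 := by rw [hset]; intro hx; exact absurd (hq i hx) (by omega)
            have hfst' : st1.1 = true := by simp [hfst, nextB, h1, h2, h3]
            rw [hi, if_neg (by simpa [PySem.Set.contains_iff] using hmem), htail', hfst']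
            simp [h1, h2, h3]
          · have hfst' : st1.1 = false := by simp [hfst, nextB, h1, h2, h3]
            by_cases h4 : is_quoted_shell_token t
            · have hbq : bIsQuoted t = true := h4
              have hset : st1.2 = q := by simp [hst1, stepB, h1, h2, h3, hbq]
              have hmem : i ∉ st1.2 := by rw [hset]; intro hx; exact absurd (hq i hx) (by omega)
              rw [hi, if_neg (by simpa [PySem.Set.contains_iff] using hmem), htail', hfst']
              simp [h1, h2, h3, h4]
            · have hbq : bIsQuoted t = false := by
                simpa [is_quoted_shell_token, bIsQuoted] using h4
              by_cases h5 : PySem.Chars.isIn ['|'] t.toList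
              · have hset : st1.2 = PySem.Set.add q i := by
                  simp [hst1, stepB, h1, h2, h3, h5, hbq]
                have hmem : i ∈ st1.2 := by rw [hset]; simp [PySem.Set.mem_add]
                rw [hi, if_pos ((PySem.Set.contains_iff _ _).2 hmem), htail', hfst']
                simp [h1, h2, h3, h4, h5]
              · have hset : st1.2 = q := by simp [hst1, stepB, h1, h2, h3, h5, hbq]
                have hmem : i ∉ st1.2 := by rw [hset]; intro hx; exact absurd (hq i hx) (by omega)
                rw [hi, if_neg (by simpa [PySem.Set.contains_iff] using hmem), htail', hfst']
                simp [h1, h2, h3, h4, h5]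

-- ===== VERDICT (by name: the statement is the Claim_ definition above) =====
theorem render_action_arguments_spec : Claim_equal_render_action_arguments := by
  intro arguments _
  unfold Spec_render_action_arguments render_action_arguments render_action_arguments_alt
  have hA : (List.foldl stepA ([], false, false) arguments).1 = Rspec arguments false := by
    simpa using foldA_eq_Rspec arguments [] false false
  have hB := mapB_eq_Rspec arguments 0 false PySem.Set.empty (by intro x hx; simp [PySem.Set.empty] at hx)
  simp only []
  rw [show (arguments.foldl
      (fun (st : List String × Bool × Bool) token =>
        if token == "|" then (st.1 ++ [token], false, false)
        else if token == "grep" then (st.1 ++ [token], true, true)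
        else if st.2.1 && st.2.2 && PySem.Str.startswith token "-" then
          (st.1 ++ [token], st.2.1, true)
        else if st.2.1 && st.2.2 && is_quoted_shell_token token then
          (st.1 ++ [token], st.2.1, false)
        else if st.2.1 && st.2.2 && PySem.Str.isIn "|" token then
          (st.1 ++ ["\"" ++ token ++ "\""], st.2.1, false)
        else
          (st.1 ++ [token], st.2.1, if st.2.1 && st.2.2 then false else st.2.2))
      ([], false, false)) = List.foldl stepA ([], false, false) arguments from rfl]
  rw [hA, ← hB]
  rfl
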